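-- pv_equiv track=rewrite | github.com/LingzhentaorG/sw_pipeline | src/sw_pipeline/internal/gnss_core/processing_v2.py | _select_measurement_pair
-- ===== SOURCE A (Python) =====
-- def _select_measurement_pair(
--     available: set[str],
--     first_candidates: tuple[str, ...],
--     second_candidates: tuple[str, ...],
-- ) -> tuple[str, str] | None:
--     for first in first_candidates:
--         if first not in available:
--             continue
--         for second in second_candidates:
--             if second in available:
--                 return first, second
--     return None
-- ===== SOURCE B (Python) =====
-- def _select_measurement_pair(
--     available: set[str],
--     first_candidates: tuple[str, ...],
--     second_candidates: tuple[str, ...],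
-- ) -> tuple[str, str] | None:
--     # The inner scan of A does not depend on `first`: the chosen second is
--     # always the first available second candidate. So compute it once, then
--     # find the first available first candidate independently.
--     second = next((s for s in second_candidates if s in available), None)
--     if second is None:
--         return None
--     first = next((f for f in first_candidates if f in available), None)
--     if first is None:
--         return None
--     return first, second
-- ===== Notes on version B (the rewrite author's own statement) =====
-- stated objective: simpler
-- what changed: B computes the first available second candidate once and the first available first candidate once in two independent scans, instead of A's nested loop that rescans all second candidates for every available first; the nested rescan is O(f*s) in the worst case but a timing run found no measurable speed difference on random inputs, so no speed is claimed.
import Mathlib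
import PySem

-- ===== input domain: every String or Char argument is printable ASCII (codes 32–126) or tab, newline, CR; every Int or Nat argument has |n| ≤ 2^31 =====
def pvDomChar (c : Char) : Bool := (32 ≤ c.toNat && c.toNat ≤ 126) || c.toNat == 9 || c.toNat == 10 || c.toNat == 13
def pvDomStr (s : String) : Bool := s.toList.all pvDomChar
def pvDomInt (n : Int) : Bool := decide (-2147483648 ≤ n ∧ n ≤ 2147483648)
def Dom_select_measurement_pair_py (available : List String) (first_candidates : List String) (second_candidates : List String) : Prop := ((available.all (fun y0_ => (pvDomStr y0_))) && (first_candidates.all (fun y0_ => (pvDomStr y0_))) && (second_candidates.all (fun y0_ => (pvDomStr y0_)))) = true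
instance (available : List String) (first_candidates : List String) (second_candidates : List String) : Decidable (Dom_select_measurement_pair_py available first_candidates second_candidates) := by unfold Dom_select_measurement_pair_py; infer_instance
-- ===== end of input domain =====

-- B replaces A's nested scan by two independent single scans (the first
-- available second candidate is computed once, since it does not depend on
-- the chosen first); no speed difference was measured.

-- ===== PORT A =====
-- inner `for second in second_candidates: if second in available: return first, second`
def pvA_inner (available : List String) (second_candidates : List String) : Option String :=
  match second_candidates with
  | [] => none
  | s :: rest => if available.contains s then some s else pvA_inner available rest

-- outer `for first in first_candidates: …`
def pvA_outer (available : List String) (first_candidates : List String) (second_candidates : List String) : Option (String × String) :=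
  match first_candidates with
  | [] => none
  | f :: rest =>
    if available.contains f then
      match pvA_inner available second_candidates with
      | some s => some (f, s)
      | none => pvA_outer available rest second_candidates
    else pvA_outer available rest second_candidates

def select_measurement_pair_py (available : List String) (first_candidates : List String) (second_candidates : List String) : Option (String × String) :=
  pvA_outer available first_candidates second_candidates

-- ===== PORT B =====
def select_measurement_pair_py_alt (available : List String) (first_candidates : List String) (second_candidates : List String) : Option (String × String) :=
  match second_candidates.find? (fun s => available.contains s) with
  | none => none
  | some second =>
    match first_candidates.find? (fun f => available.contains f) with
    | none => none
    | some first => some (first, second)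

-- ===== PRECONDITION & SPEC =====
def Spec_select_measurement_pair_py (available : List String) (first_candidates : List String) (second_candidates : List String) (out : Option (String × String)) : Prop := out = select_measurement_pair_py_alt available first_candidates second_candidates
instance (available : List String) (first_candidates : List String) (second_candidates : List String) (out : Option (String × String)) : Decidable (Spec_select_measurement_pair_py available first_candidates second_candidates out) := by unfold Spec_select_measurement_pair_py; infer_instance

-- ===== CLAIM (what is proved, stated in full; the proofs are below) =====
def Claim_equal_select_measurement_pair_py : Prop := ∀ (available : List String) (first_candidates : List String) (second_candidates : List String), Dom_select_measurement_pair_py available first_candidates second_candidates → Spec_select_measurement_pair_py available first_candidates second_candidates (select_measurement_pair_py available first_candidates second_candidates)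

-- ===== LEMMAS AND PROOFS =====

lemma pvA_inner_eq_find? (available second_candidates : List String) :
    pvA_inner available second_candidates
      = second_candidates.find? (fun s => available.contains s) := by
  induction second_candidates with
  | nil => rfl
  | cons s rest ih =>
    cases h : available.contains s <;>
      simp only [pvA_inner, List.find?, h, if_true, if_false, Bool.false_eq_true, ih]

lemma pvA_outer_eq_alt (available first_candidates second_candidates : List String) :
    pvA_outer available first_candidates second_candidates
      = select_measurement_pair_py_alt available first_candidates second_candidates := by
  induction first_candidates with
  | nil =>
    simp only [pvA_outer, select_measurement_pair_py_alt, List.find?]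
    cases second_candidates.find? (fun s => available.contains s) <;> rfl
  | cons f rest ih =>
    simp only [pvA_outer, select_measurement_pair_py_alt, List.find?,
      pvA_inner_eq_find?] at ih ⊢
    cases h : available.contains f <;>
      cases hs : second_candidates.find? (fun s => available.contains s) <;>
        simp_all only [if_true, if_false, Bool.false_eq_true]

-- ===== VERDICT (by name: the statement is the Claim_ definition above) =====
theorem select_measurement_pair_py_spec : Claim_equal_select_measurement_pair_py := by
  intro available fc sc _
  unfold Spec_select_measurement_pair_py select_measurement_pair_py
  exact pvA_outer_eq_alt available fc sc
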